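-- pv_equiv track=rewrite | github.com/Francois0203/Monte-Carlo-Simulations | naughts_and_crosses.py | _describe_line
-- ===== SOURCE A (Python) =====
-- BOARD_SIZE  = 3
--
-- def _describe_line(line):
--     """Turn a tuple like (0,4,8) into a human-readable label."""
--     n = BOARD_SIZE
--     rows = {tuple(row * n + col for col in range(n)): f"Row {row + 1}"
--             for row in range(n)}
--     cols = {tuple(row * n + col for row in range(n)): f"Col {col + 1}"
--             for col in range(n)}
--     diag1 = tuple(i * n + i for i in range(n))
--     diag2 = tuple(i * n + (n - 1 - i) for i in range(n))
--
--     if line in rows:   return rows[line]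
--     if line in cols:   return cols[line]
--     if line == diag1:  return "Diagonal (↘)"
--     if line == diag2:  return "Diagonal (↙)"
--     return str(line)
-- ===== SOURCE B (Python) =====
-- BOARD_SIZE  = 3
--
-- def _describe_line(line):
--     """Turn a tuple like (0,4,8) into a human-readable label."""
--     n = BOARD_SIZE
--     if len(line) == n:
--         r, c = line[0] // n, line[0] % n
--         if 0 <= r < n and line == tuple(r * n + col for col in range(n)):
--             return f"Row {r + 1}"
--         if line == tuple(row * n + c for row in range(n)):
--             return f"Col {c + 1}"
--         if line == tuple(i * n + i for i in range(n)):
--             return "Diagonal (↘)"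
--         if line == tuple(i * n + (n - 1 - i) for i in range(n)):
--             return "Diagonal (↙)"
--     return str(line)
-- ===== Notes on version B (the rewrite author's own statement) =====
-- stated objective: simpler
-- what changed: Drops the rows/cols dict comprehensions and lookups: B derives the candidate row and column of the first cell with floor division and modulo, confirms by reconstructing that single candidate line, and otherwise falls through to str(line).
import Mathlib
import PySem

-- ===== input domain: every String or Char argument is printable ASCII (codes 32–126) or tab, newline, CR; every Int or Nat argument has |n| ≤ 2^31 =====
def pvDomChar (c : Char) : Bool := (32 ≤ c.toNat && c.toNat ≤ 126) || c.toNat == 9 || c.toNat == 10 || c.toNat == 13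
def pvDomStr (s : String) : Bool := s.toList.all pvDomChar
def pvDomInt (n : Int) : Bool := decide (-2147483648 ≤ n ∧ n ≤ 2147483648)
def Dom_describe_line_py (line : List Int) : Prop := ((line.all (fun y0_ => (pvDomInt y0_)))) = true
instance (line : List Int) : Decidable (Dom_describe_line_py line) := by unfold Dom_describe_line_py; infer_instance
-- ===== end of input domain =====

-- B drops A's rows/cols dictionaries: it computes the candidate row/col from line[0]
-- (// and %) and confirms by reconstructing that single line; objective: simpler.

-- str(tuple) for a tuple of ints, shared by both ports (both Pythons end with 'return str(line)').
def pyTupleRepr (line : List Int) : String :=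
  match line with
  | [] => "()"
  | [x] => "(" ++ PySem.Int.toStr x ++ ",)"
  | x :: rest =>
      "(" ++ PySem.Int.toStr x ++
        (rest.map (fun y => ", " ++ PySem.Int.toStr y)).foldl (· ++ ·) "" ++ ")"

-- ===== PORT A =====
def describe_line_py (line : List Int) : String :=
  let n : Int := 3
  let rng := PySem.List.pyRange 0 n 1
  let rows : PySem.Dict (List Int) String :=
    PySem.Dict.ofList (rng.map (fun row =>
      (rng.map (fun col => row * n + col), "Row " ++ PySem.Int.toStr (row + 1))))
  let cols : PySem.Dict (List Int) String :=
    PySem.Dict.ofList (rng.map (fun col =>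
      (rng.map (fun row => row * n + col), "Col " ++ PySem.Int.toStr (col + 1))))
  let diag1 := rng.map (fun i => i * n + i)
  let diag2 := rng.map (fun i => i * n + (n - 1 - i))
  match rows.get? line with
  | some v => v
  | none =>
    match cols.get? line with
    | some v => v
    | none =>
      if line = diag1 then "Diagonal (↘)"
      else if line = diag2 then "Diagonal (↙)"
      else pyTupleRepr line

-- ===== PORT B =====
def describe_line_py_alt (line : List Int) : String :=
  let n : Int := 3
  if PySem.List.len line = n then
    let r := PySem.Int.floordiv (PySem.List.pyGetD line 0 0) n
    let c := PySem.Int.mod (PySem.List.pyGetD line 0 0) n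
    if 0 ≤ r ∧ r < n ∧ line = (PySem.List.pyRange 0 n 1).map (fun col => r * n + col) then
      "Row " ++ PySem.Int.toStr (r + 1)
    else if line = (PySem.List.pyRange 0 n 1).map (fun row => row * n + c) then
      "Col " ++ PySem.Int.toStr (c + 1)
    else if line = (PySem.List.pyRange 0 n 1).map (fun i => i * n + i) then
      "Diagonal (↘)"
    else if line = (PySem.List.pyRange 0 n 1).map (fun i => i * n + (n - 1 - i)) then
      "Diagonal (↙)"
    else pyTupleRepr line
  else pyTupleRepr line

-- ===== PRECONDITION & SPEC =====
def Spec_describe_line_py (line : List Int) (out : String) : Prop := out = describe_line_py_alt line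
instance (line : List Int) (out : String) : Decidable (Spec_describe_line_py line out) := by unfold Spec_describe_line_py; infer_instance

-- ===== CLAIM (what is proved, stated in full; the proofs are below) =====
def Claim_equal_describe_line_py : Prop := ∀ (line : List Int), Dom_describe_line_py line → Spec_describe_line_py line (describe_line_py line)

-- ===== LEMMAS AND PROOFS =====

theorem pv_rng : PySem.List.pyRange 0 3 1 = [0,1,2] := by decide

theorem pv_rows : (PySem.Dict.ofList [([0 * 3 + 0, 0 * 3 + 1, 0 * 3 + 2], "Row " ++ PySem.Int.toStr (0 + 1)),
      ([1 * 3 + 0, 1 * 3 + 1, 1 * 3 + 2], "Row " ++ PySem.Int.toStr (1 + 1)),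
      ([2 * 3 + 0, 2 * 3 + 1, 2 * 3 + 2], "Row " ++ PySem.Int.toStr (2 + 1))] : PySem.Dict (List Int) String)
    = PySem.Dict.mk [([0,1,2], "Row 1"), ([3,4,5], "Row 2"), ([6,7,8], "Row 3")] := by decide

theorem pv_cols : (PySem.Dict.ofList [([0 * 3 + 0, 1 * 3 + 0, 2 * 3 + 0], "Col " ++ PySem.Int.toStr (0 + 1)),
      ([0 * 3 + 1, 1 * 3 + 1, 2 * 3 + 1], "Col " ++ PySem.Int.toStr (1 + 1)),
      ([0 * 3 + 2, 1 * 3 + 2, 2 * 3 + 2], "Col " ++ PySem.Int.toStr (2 + 1))] : PySem.Dict (List Int) String)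
    = PySem.Dict.mk [([0,3,6], "Col 1"), ([1,4,7], "Col 2"), ([2,5,8], "Col 3")] := by decide

theorem pv_nil_get (x : List Int) : (PySem.Dict.mk ([] : List (List Int × String))).get? x = none := rfl

-- A as a plain chain of list comparisons.
theorem pv_A_char (line : List Int) : describe_line_py line =
    if [0,1,2] = line then "Row 1" else if [3,4,5] = line then "Row 2" else if [6,7,8] = line then "Row 3"
    else if [0,3,6] = line then "Col 1" else if [1,4,7] = line then "Col 2" else if [2,5,8] = line then "Col 3"
    else if line = [0 * 3 + 0, 1 * 3 + 1, 2 * 3 + 2] then "Diagonal (↘)"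
    else if line = [0 * 3 + (3 - 1 - 0), 1 * 3 + (3 - 1 - 1), 2 * 3 + (3 - 1 - 2)] then "Diagonal (↙)"
    else pyTupleRepr line := by
  simp only [describe_line_py]
  rw [pv_rng]
  simp only [List.map_cons, List.map_nil]
  rw [pv_rows, pv_cols]
  simp only [PySem.Dict.get?_mk_cons, pv_nil_get, beq_iff_eq]
  split_ifs <;> rfl

-- B on a length-3 list, with // and % written as Int division (divisor 3 > 0).
theorem pv_B_char3 (a b c : Int) : describe_line_py_alt [a, b, c] =
    if 0 ≤ a / 3 ∧ a / 3 < 3 ∧ a = a / 3 * 3 + 0 ∧ b = a / 3 * 3 + 1 ∧ c = a / 3 * 3 + 2 then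
      "Row " ++ PySem.Int.toStr (a / 3 + 1)
    else if a = 0 * 3 + a % 3 ∧ b = 1 * 3 + a % 3 ∧ c = 2 * 3 + a % 3 then
      "Col " ++ PySem.Int.toStr (a % 3 + 1)
    else if a = 0 * 3 + 0 ∧ b = 1 * 3 + 1 ∧ c = 2 * 3 + 2 then "Diagonal (↘)"
    else if a = 0 * 3 + (3 - 1 - 0) ∧ b = 1 * 3 + (3 - 1 - 1) ∧ c = 2 * 3 + (3 - 1 - 2) then "Diagonal (↙)"
    else pyTupleRepr [a, b, c] := by
  simp only [describe_line_py_alt, PySem.List.len_eq, List.length_cons, List.length_nil,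
    PySem.List.pyGetD_zero_cons, pv_rng, List.map_cons, List.map_nil, List.cons.injEq, and_true,
    PySem.Int.floordiv_eq_ediv_of_pos (show (0:Int) < 3 by norm_num),
    PySem.Int.mod_eq_emod_of_pos (show (0:Int) < 3 by norm_num)]
  rw [if_pos (by omega : ((0 + 1 + 1 + 1 : Nat) : Int) = 3)]

theorem pv_B_other (line : List Int) (h : line.length ≠ 3) :
    describe_line_py_alt line = pyTupleRepr line := by
  simp only [describe_line_py_alt, PySem.List.len_eq]
  rw [if_neg (by omega : ¬((line.length : Int) = 3))]

theorem pv_w1 : describe_line_py_alt [0,1,2] = "Row 1" := by rw [pv_B_char3]; norm_num; decide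
theorem pv_w2 : describe_line_py_alt [3,4,5] = "Row 2" := by rw [pv_B_char3]; norm_num; decide
theorem pv_w3 : describe_line_py_alt [6,7,8] = "Row 3" := by rw [pv_B_char3]; norm_num; decide
theorem pv_w4 : describe_line_py_alt [0,3,6] = "Col 1" := by rw [pv_B_char3]; norm_num; decide
theorem pv_w5 : describe_line_py_alt [1,4,7] = "Col 2" := by rw [pv_B_char3]; norm_num; decide
theorem pv_w6 : describe_line_py_alt [2,5,8] = "Col 3" := by rw [pv_B_char3]; norm_num; decide
theorem pv_w7 : describe_line_py_alt [0 * 3 + 0, 1 * 3 + 1, 2 * 3 + 2] = "Diagonal (↘)" := by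
  rw [pv_B_char3]; norm_num
theorem pv_w8 : describe_line_py_alt [0 * 3 + (3 - 1 - 0), 1 * 3 + (3 - 1 - 1), 2 * 3 + (3 - 1 - 2)] = "Diagonal (↙)" := by
  rw [pv_B_char3]; norm_num

-- ===== VERDICT (by name: the statement is the Claim_ definition above) =====
set_option maxHeartbeats 1600000 in
theorem describe_line_py_spec : Claim_equal_describe_line_py := by
  intro line _
  unfold Spec_describe_line_py
  rw [pv_A_char]
  by_cases e1 : [0,1,2] = line
  · rw [if_pos e1, ← e1, pv_w1]
  rw [if_neg e1]
  by_cases e2 : [3,4,5] = line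
  · rw [if_pos e2, ← e2, pv_w2]
  rw [if_neg e2]
  by_cases e3 : [6,7,8] = line
  · rw [if_pos e3, ← e3, pv_w3]
  rw [if_neg e3]
  by_cases e4 : [0,3,6] = line
  · rw [if_pos e4, ← e4, pv_w4]
  rw [if_neg e4]
  by_cases e5 : [1,4,7] = line
  · rw [if_pos e5, ← e5, pv_w5]
  rw [if_neg e5]
  by_cases e6 : [2,5,8] = line
  · rw [if_pos e6, ← e6, pv_w6]
  rw [if_neg e6]
  by_cases e7 : line = [0 * 3 + 0, 1 * 3 + 1, 2 * 3 + 2]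
  · rw [if_pos e7, e7, pv_w7]
  rw [if_neg e7]
  by_cases e8 : line = [0 * 3 + (3 - 1 - 0), 1 * 3 + (3 - 1 - 1), 2 * 3 + (3 - 1 - 2)]
  · rw [if_pos e8, e8, pv_w8]
  rw [if_neg e8]
  rcases line with _ | ⟨a, _ | ⟨b, _ | ⟨c, _ | ⟨d, rest⟩⟩⟩⟩
  · exact (pv_B_other [] (by simp)).symm
  · exact (pv_B_other [a] (by simp)).symm
  · exact (pv_B_other [a, b] (by simp)).symm
  swap
  · exact (pv_B_other (a :: b :: c :: d :: rest) (by simp)).symm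
  have n1 : ¬(a = 0 ∧ b = 1 ∧ c = 2) := fun ⟨x, y, z⟩ => e1 (by rw [x, y, z])
  have n2 : ¬(a = 3 ∧ b = 4 ∧ c = 5) := fun ⟨x, y, z⟩ => e2 (by rw [x, y, z])
  have n3 : ¬(a = 6 ∧ b = 7 ∧ c = 8) := fun ⟨x, y, z⟩ => e3 (by rw [x, y, z])
  have n4 : ¬(a = 0 ∧ b = 3 ∧ c = 6) := fun ⟨x, y, z⟩ => e4 (by rw [x, y, z])
  have n5 : ¬(a = 1 ∧ b = 4 ∧ c = 7) := fun ⟨x, y, z⟩ => e5 (by rw [x, y, z])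
  have n6 : ¬(a = 2 ∧ b = 5 ∧ c = 8) := fun ⟨x, y, z⟩ => e6 (by rw [x, y, z])
  have n7 : ¬(a = 0 ∧ b = 4 ∧ c = 8) := fun ⟨x, y, z⟩ => e7 (by rw [x, y, z]; rfl)
  have n8 : ¬(a = 2 ∧ b = 4 ∧ c = 6) := fun ⟨x, y, z⟩ => e8 (by rw [x, y, z]; rfl)
  rw [pv_B_char3, if_neg (by omega), if_neg (by omega), if_neg (by omega), if_neg (by omega)]
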